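-- pv_equiv track=rewrite | github.com/MrBrantCode/unitest_baseline | mut_generate/mist_train_taco/taco_7498/solution.py | find_elements_for_operations
-- ===== SOURCE A (Python) =====
-- def find_elements_for_operations(n, q, a, queries):
--     mx1 = max(a)
--     dp = {}
--     count = 0
--
--     while True:
--         count += 1
--         val1 = a[0]
--         val2 = a[1]
--         if val1 == mx1:
--             break
--         if val1 > val2:
--             a.remove(val2)
--             a.append(val2)
--         else:
--             a.remove(val1)
--             a.append(val1)
--         dp[count] = (val1, val2)
--
--     results = []
--     for x in queries:
--         if x in dp:
--             results.append(dp[x])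
--         else:
--             xx = (x - count) % (n - 1)
--             results.append((a[0], a[xx + 1]))
--
--     return results
-- ===== SOURCE B (Python) =====
-- def find_elements_for_operations(n, q, a, queries):
--     # One forward prefix-max pass instead of simulating the rotation with list.remove.
--     # Equivalence is about the return value; 'a' is mutated in place the same
--     # way A leaves it (stabilized rotation order).
--     mx = max(a)
--     m = a.index(mx)
--     dp = {}
--     losers = []
--     pref = a[0]
--     for k in range(1, m + 1):
--         chal = a[k]
--         dp[k] = (pref, chal)
--         losers.append(min(pref, chal))
--         if chal > pref:
--             pref = chal
--     count = m + 1
--     final = [mx] + a[m + 1:] + losers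
--     results = []
--     for x in queries:
--         if 1 <= x <= m:
--             results.append(dp[x])
--         else:
--             xx = (x - count) % (n - 1)
--             results.append((final[0], final[xx + 1]))
--     a[:] = final
--     return results
-- ===== Notes on version B (the rewrite author's own statement) =====
-- stated objective: alternative
-- what changed: Replaces A's in-place rotation simulation (repeated list.remove/append duels) by a single forward prefix-maximum pass that builds the dp table and the losers list at once and reconstructs the stabilized array directly, answering out-of-range queries by the same modular index.
-- crash fix: On one-element lists A raises IndexError reading a[1]; B returns normally (e.g. [] for empty queries) whenever every query resolves against the single stabilized element. — e.g. on find_elements_for_operations(2, 0, [5], []): A raises IndexError, B returns []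
import Mathlib
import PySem

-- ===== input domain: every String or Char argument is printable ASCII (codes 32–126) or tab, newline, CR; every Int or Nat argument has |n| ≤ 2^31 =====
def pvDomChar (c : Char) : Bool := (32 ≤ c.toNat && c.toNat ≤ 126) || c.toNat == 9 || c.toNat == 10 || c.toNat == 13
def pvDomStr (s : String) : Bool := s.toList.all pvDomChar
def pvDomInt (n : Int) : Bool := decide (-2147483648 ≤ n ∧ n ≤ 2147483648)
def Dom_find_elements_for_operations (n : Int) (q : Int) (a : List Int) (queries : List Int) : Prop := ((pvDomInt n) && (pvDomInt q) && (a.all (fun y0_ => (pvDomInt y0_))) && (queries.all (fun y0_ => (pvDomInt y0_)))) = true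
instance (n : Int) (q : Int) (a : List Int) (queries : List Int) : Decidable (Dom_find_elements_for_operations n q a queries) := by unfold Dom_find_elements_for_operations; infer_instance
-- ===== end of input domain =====

-- B replaces A's in-place duel simulation (list.remove/append per step) by one forward prefix-max pass;
-- equivalence is about the RETURN value (both Pythons leave `a` mutated identically).

-- ===== PORT A =====
-- the `while True` loop of A; fuel only makes it total (the loop reaches the max
-- within a.length iterations on every input Pre_ admits)
def pvLoopA (fuel : Nat) (mx1 : Int) (a : List Int)
    (dp : PySem.Dict Int (Int × Int)) (count : Int) :
    Option (List Int × PySem.Dict Int (Int × Int) × Int) :=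
  match fuel with
  | 0 => none
  | fuel + 1 =>
    let count1 := count + 1
    match PySem.List.pyGet? a 0, PySem.List.pyGet? a 1 with
    | some val1, some val2 =>
      if val1 = mx1 then some (a, dp, count1)
      else
        let a' :=
          if val1 > val2 then
            (match PySem.List.remove? a val2 with | some r => r | none => a) ++ [val2]
          else
            (match PySem.List.remove? a val1 with | some r => r | none => a) ++ [val1]
        pvLoopA fuel mx1 a' (dp.insert count1 (val1, val2)) count1
    | _, _ => none

def find_elements_for_operations (n : Int) (q : Int) (a : List Int) (queries : List Int) : List (Int × Int) :=
  match PySem.List.max? a (fun y => y) with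
  | none => []
  | some mx1 =>
    match pvLoopA a.length mx1 a PySem.Dict.empty 0 with
    | none => []
    | some (a', dp, count) =>
      queries.foldl (fun results x =>
        match dp.get? x with
        | some v => results ++ [v]
        | none =>
          let xx := PySem.Int.mod (x - count) (n - 1)
          match PySem.List.pyGet? a' 0, PySem.List.pyGet? a' (xx + 1) with
          | some u, some v => results ++ [(u, v)]
          | _, _ => results ++ [(0, 0)]) []   -- unreachable under Pre_ (IndexError)

-- ===== PORT B =====
-- loop body of B's single forward pass (state: dp, losers, pref)
def pvStepB (a : List Int)
    (s : PySem.Dict Int (Int × Int) × List Int × Int) (k : Int) :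
    PySem.Dict Int (Int × Int) × List Int × Int :=
  let chal := (PySem.List.pyGet? a k).getD 0
  let dp := s.1.insert k (s.2.2, chal)
  let losers := s.2.1 ++ [min s.2.2 chal]
  let pref := if chal > s.2.2 then chal else s.2.2
  (dp, losers, pref)

def find_elements_for_operations_alt (n : Int) (q : Int) (a : List Int) (queries : List Int) : List (Int × Int) :=
  match PySem.List.max? a (fun y => y) with
  | none => []
  | some mx =>
    match PySem.List.index? a mx with
    | none => []
    | some m =>
      let st := (PySem.List.pyRange 1 ((m : Int) + 1) 1).foldl (pvStepB a)
        (PySem.Dict.empty, [], (PySem.List.pyGet? a 0).getD 0)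
      let dp := st.1
      let count : Int := (m : Int) + 1
      let final := mx :: (PySem.List.slice a (some ((m : Int) + 1)) none ++ st.2.1)
      queries.foldl (fun results x =>
        if 1 ≤ x ∧ x ≤ (m : Int) then
          results ++ [(dp.get? x).getD (0, 0)]
        else
          let xx := PySem.Int.mod (x - count) (n - 1)
          match PySem.List.pyGet? final 0, PySem.List.pyGet? final (xx + 1) with
          | some u, some v => results ++ [(u, v)]
          | _, _ => results ++ [(0, 0)]) []   -- unreachable under Pre_ (IndexError)

-- ===== PRECONDITION & SPEC =====
-- index of the FIRST maximum of a (0 on the empty list; only used through Pre_/Raises_)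
def pvM (a : List Int) : Int :=
  match PySem.List.max? a (fun y => y) with
  | some mx => ((PySem.List.index? a mx).getD 0 : Nat)
  | none => 0

-- Pre_ excludes exactly the inputs where the Python A raises: lists shorter than 2
-- (IndexError at a[1]), and queries outside dp that hit n == 1 (ZeroDivisionError)
-- or an out-of-range rotation index (IndexError).
def Pre_find_elements_for_operations (n : Int) (q : Int) (a : List Int) (queries : List Int) : Prop :=
  2 ≤ a.length ∧ ∀ x ∈ queries, (1 ≤ x ∧ x ≤ pvM a) ∨
    (n ≠ 1 ∧ -(a.length : Int) ≤ PySem.Int.mod (x - (pvM a + 1)) (n - 1) + 1 ∧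
      PySem.Int.mod (x - (pvM a + 1)) (n - 1) + 1 < (a.length : Int))
instance (n : Int) (q : Int) (a : List Int) (queries : List Int) : Decidable (Pre_find_elements_for_operations n q a queries) := by unfold Pre_find_elements_for_operations; infer_instance

def pvWitness_find_elements_for_operations : Int × Int × List Int × List Int :=
  (3, 1, [1, 3, 2], [1, 2, 5])

-- On one-element lists A always raises IndexError at a[1]; B returns normally whenever
-- every query resolves (empty queries, or a rotation index hitting the single element).
def Raises_find_elements_for_operations (n : Int) (q : Int) (a : List Int) (queries : List Int) : Prop :=
  a.length = 1 ∧ ∀ x ∈ queries, n ≠ 1 ∧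
    (PySem.Int.mod (x - 1) (n - 1) = -1 ∨ PySem.Int.mod (x - 1) (n - 1) = -2)
instance (n : Int) (q : Int) (a : List Int) (queries : List Int) : Decidable (Raises_find_elements_for_operations n q a queries) := by unfold Raises_find_elements_for_operations; infer_instance

def pvRaiseWitness_find_elements_for_operations : Int × Int × List Int × List Int :=
  (2, 0, [5], [])
def pvRaiseWitnessOut_find_elements_for_operations : List (Int × Int) := []

def Spec_find_elements_for_operations (n : Int) (q : Int) (a : List Int) (queries : List Int) (out : List (Int × Int)) : Prop := out = find_elements_for_operations_alt n q a queries
instance (n : Int) (q : Int) (a : List Int) (queries : List Int) (out : List (Int × Int)) : Decidable (Spec_find_elements_for_operations n q a queries out) := by unfold Spec_find_elements_for_operations; infer_instance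

-- ===== CLAIM (what is proved, stated in full; the proofs are below) =====
def Claim_equal_find_elements_for_operations : Prop := ∀ (n : Int) (q : Int) (a : List Int) (queries : List Int), Dom_find_elements_for_operations n q a queries → Pre_find_elements_for_operations n q a queries → Spec_find_elements_for_operations n q a queries (find_elements_for_operations n q a queries)

def Claim_raises_find_elements_for_operations : Prop := (∀ (n : Int) (q : Int) (a : List Int) (queries : List Int), Dom_find_elements_for_operations n q a queries → Raises_find_elements_for_operations n q a queries → ¬ Pre_find_elements_for_operations n q a queries) ∧ (Dom_find_elements_for_operations (pvRaiseWitness_find_elements_for_operations.1) (pvRaiseWitness_find_elements_for_operations.2.1) (pvRaiseWitness_find_elements_for_operations.2.2.1) (pvRaiseWitness_find_elements_for_operations.2.2.2) ∧ Raises_find_elements_for_operations (pvRaiseWitness_find_elements_for_operations.1) (pvRaiseWitness_find_elements_for_operations.2.1) (pvRaiseWitness_find_elements_for_operations.2.2.1) (pvRaiseWitness_find_elements_for_operations.2.2.2) ∧ find_elements_for_operations_alt (pvRaiseWitness_find_elements_for_operations.1) (pvRaiseWitness_find_elements_for_operations.2.1) (pvRaiseWitness_find_elements_for_operations.2.2.1)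 (pvRaiseWitness_find_elements_for_operations.2.2.2) = pvRaiseWitnessOut_find_elements_for_operations)


-- ===== LEMMAS AND PROOFS =====

-- proof-side description of A's duel steps: dp pairs (front, challenger) in order
def pvPairs : List Int → Nat → List (Int × Int)
  | v1 :: v2 :: rest, m+1 => (v1, v2) :: pvPairs (max v1 v2 :: (rest ++ [min v1 v2])) m
  | _, _ => []

-- proof-side description of the list A's loop leaves behind
def pvStab : List Int → Nat → List Int
  | v1 :: v2 :: rest, m+1 => pvStab (max v1 v2 :: (rest ++ [min v1 v2])) m
  | a, _ => a

-- dp built by inserting fresh keys c+1, c+2, … in order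
def pvInsertSeq : PySem.Dict Int (Int × Int) → Int → List (Int × Int) → PySem.Dict Int (Int × Int)
  | dp, _, [] => dp
  | dp, c, p :: ps => pvInsertSeq (dp.insert (c + 1) p) (c + 1) ps

-- running prefix maximum
def pvPM (v : Int) (l : List Int) : Int := l.foldl max v

lemma pvPairs_zero (a : List Int) : pvPairs a 0 = [] := by
  cases a with
  | nil => rfl
  | cons v1 t => cases t <;> rfl

lemma pvStab_zero (a : List Int) : pvStab a 0 = a := by
  cases a with
  | nil => rfl
  | cons v1 t => cases t <;> rfl

lemma pvPairs_length : ∀ (m : Nat) (a : List Int), 2 ≤ a.length → m + 1 ≤ a.length →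
    (pvPairs a m).length = m := by
  intro m
  induction m with
  | zero => intro a _ _; simp [pvPairs_zero]
  | succ m ih =>
    intro a h2 h
    match a, h2 with
    | v1 :: v2 :: rest, _ =>
      simp only [pvPairs]
      rw [List.length_cons,
        ih (max v1 v2 :: (rest ++ [min v1 v2])) (by simp) (by simp at h ⊢; omega)]

lemma pvPairs_snoc : ∀ (m : Nat) (v1 : Int) (t : List Int), m < t.length →
    pvPairs (v1 :: t) (m + 1) = pvPairs (v1 :: t) m ++ [(pvPM v1 (t.take m), t.getD m 0)] := by
  intro m
  induction m with
  | zero =>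
    intro v1 t h
    match t, h with
    | v2 :: r, _ => simp [pvPairs, pvPairs_zero, pvPM]
  | succ m ih =>
    intro v1 t h
    match t, h with
    | v2 :: r, h =>
      have hm : m < r.length := by simp at h; omega
      have hm' : m < (r ++ [min v1 v2]).length := by simp; omega
      simp only [pvPairs]
      rw [ih (max v1 v2) (r ++ [min v1 v2]) hm']
      have h1 : (r ++ [min v1 v2]).take m = r.take m := List.take_append_of_le_length (by omega)
      have h2 : (r ++ [min v1 v2]).getD m 0 = r.getD m 0 := by
        rw [List.getD_eq_getElem?_getD, List.getD_eq_getElem?_getD, List.getElem?_append_left hm]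
      rw [h1, h2]
      have h3 : pvPM (max v1 v2) (r.take m) = pvPM v1 ((v2 :: r).take (m + 1)) := by
        simp [pvPM, List.foldl_cons]
      have h4 : r.getD m 0 = (v2 :: r).getD (m + 1) 0 := by
        rw [List.getD_eq_getElem?_getD, List.getD_eq_getElem?_getD]; rfl
      rw [h3, h4]
      simp

lemma pvGet_one (x y : Int) (t : List Int) : PySem.List.pyGet? (x :: y :: t) 1 = some y := by
  have h := PySem.List.pyGet?_cons_succ x (y :: t) 0
  simpa using h

lemma pvIdx_step (m : Nat) (v1 v2 : Int) (rest : List Int) (mx : Int)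
    (h1 : v1 ≠ mx) (h2 : v1 ≤ mx) (h3 : v2 ≤ mx)
    (h : PySem.List.index? (v2 :: rest) mx = some m) :
    PySem.List.index? (max v1 v2 :: (rest ++ [min v1 v2])) mx = some m := by
  cases m with
  | zero =>
    have hv2 : v2 = mx := by
      rcases (PySem.List.index?_eq_some_iff _ _ _).1 h with ⟨pre, suf, heq, hlen, _⟩
      have : pre = [] := List.eq_nil_of_length_eq_zero hlen
      subst this
      simpa using congrArg (fun l => l.head?) heq
    have : max v1 v2 = mx := by rw [← hv2]; exact max_eq_right (hv2 ▸ h2)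
    rw [this]
    exact PySem.List.index?_cons_self _ _
  | succ m =>
    have hv2 : v2 ≠ mx := by
      intro hh
      rw [hh, PySem.List.index?_cons_self] at h
      simp at h
    have hrest : PySem.List.index? rest mx = some m := by
      rw [PySem.List.index?_cons_of_ne _ hv2] at h
      cases hidx : PySem.List.index? rest mx with
      | none => rw [hidx] at h; simp at h
      | some k => rw [hidx] at h; simp at h; exact congrArg some h
    have hmem : mx ∈ rest := by
      have := (PySem.List.index?_isSome_iff rest mx).1 (by rw [hrest]; rfl)
      exact this
    have hmax : max v1 v2 ≠ mx := by
      rcases max_choice v1 v2 with hc | hc <;> rw [hc] <;> assumption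
    rw [PySem.List.index?_cons_of_ne _ hmax, PySem.List.index?_append_of_mem _ hmem, hrest]
    rfl

lemma pvStab_eq : ∀ (m : Nat) (a : List Int) (mx : Int), 2 ≤ a.length →
    (∀ y ∈ a, y ≤ mx) → PySem.List.index? a mx = some m →
    pvStab a m = mx :: (a.drop (m + 1) ++ (pvPairs a m).map (fun p => min p.1 p.2)) := by
  intro m
  induction m with
  | zero =>
    intro a mx hlen hub hidx
    rcases (PySem.List.index?_eq_some_iff _ _ _).1 hidx with ⟨pre, suf, heq, hplen, _⟩
    have : pre = [] := List.eq_nil_of_length_eq_zero hplen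
    subst this
    simp at heq
    subst heq
    simp [pvStab_zero, pvPairs_zero]
  | succ m ih =>
    intro a mx hlen hub hidx
    match a, hlen with
    | v1 :: v2 :: rest, _ =>
      have hv1 : v1 ≠ mx := by
        intro hh
        rw [hh, PySem.List.index?_cons_self] at hidx
        simp at hidx
      have htail : PySem.List.index? (v2 :: rest) mx = some m := by
        rw [PySem.List.index?_cons_of_ne _ hv1] at hidx
        cases hidx2 : PySem.List.index? (v2 :: rest) mx with
        | none => rw [hidx2] at hidx; simp at hidx
        | some k => rw [hidx2] at hidx; simp at hidx; simp [hidx]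
      have hub1 : v1 ≤ mx := hub v1 (by simp)
      have hub2 : v2 ≤ mx := hub v2 (by simp)
      have hmlen : m + 1 < (v1 :: v2 :: rest).length := by
        rcases PySem.List.getElem_of_index?_eq_some hidx with ⟨hk, _⟩
        exact hk
      have hmrest : m ≤ rest.length := by simp at hmlen; omega
      have hidx' := pvIdx_step m v1 v2 rest mx hv1 hub1 hub2 htail
      have hub' : ∀ y ∈ max v1 v2 :: (rest ++ [min v1 v2]), y ≤ mx := by
        intro y hy
        simp at hy
        rcases hy with hy | hy | hy
        · rcases max_choice v1 v2 with hc | hc <;> rw [hy, hc] <;> assumption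
        · exact hub y (by simp [hy])
        · rcases min_choice v1 v2 with hc | hc <;> rw [hy, hc] <;> assumption
      have ihres := ih (max v1 v2 :: (rest ++ [min v1 v2])) mx (by simp) hub' hidx'
      show pvStab (v1 :: v2 :: rest) (m + 1) = _
      have hstep : pvStab (v1 :: v2 :: rest) (m + 1)
          = pvStab (max v1 v2 :: (rest ++ [min v1 v2])) m := rfl
      rw [hstep, ihres]
      have hdrop : (max v1 v2 :: (rest ++ [min v1 v2])).drop (m + 1)
          = rest.drop m ++ [min v1 v2] := by
        simp only [List.drop_succ_cons]
        exact List.drop_append_of_le_length hmrest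
      have hdrop2 : (v1 :: v2 :: rest).drop (m + 1 + 1) = rest.drop m := rfl
      have hpairs : pvPairs (v1 :: v2 :: rest) (m + 1)
          = (v1, v2) :: pvPairs (max v1 v2 :: (rest ++ [min v1 v2])) m := rfl
      rw [hdrop, hdrop2, hpairs]
      simp

lemma pvLoopA_spec : ∀ (m : Nat) (a : List Int) (mx : Int)
    (dp : PySem.Dict Int (Int × Int)) (c : Int) (fuel : Nat), 2 ≤ a.length →
    (∀ y ∈ a, y ≤ mx) → PySem.List.index? a mx = some m → m + 1 ≤ fuel →
    pvLoopA fuel mx a dp c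
      = some (pvStab a m, pvInsertSeq dp c (pvPairs a m), c + (m : Int) + 1) := by
  intro m
  induction m with
  | zero =>
    intro a mx dp c fuel hlen hub hidx hfuel
    rcases (PySem.List.index?_eq_some_iff _ _ _).1 hidx with ⟨pre, suf, heq, hplen, _⟩
    have : pre = [] := List.eq_nil_of_length_eq_zero hplen
    subst this
    simp at heq
    subst heq
    match suf, hlen with
    | v2 :: t, _ =>
      match fuel, hfuel with
      | f + 1, _ =>
        simp [pvLoopA, PySem.List.pyGet?_zero_cons, pvStab_zero, pvPairs_zero, pvInsertSeq]
  | succ m ih =>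
    intro a mx dp c fuel hlen hub hidx hfuel
    match a, hlen with
    | v1 :: v2 :: rest, _ =>
      have hv1 : v1 ≠ mx := by
        intro hh
        rw [hh, PySem.List.index?_cons_self] at hidx
        simp at hidx
      have htail : PySem.List.index? (v2 :: rest) mx = some m := by
        rw [PySem.List.index?_cons_of_ne _ hv1] at hidx
        cases hidx2 : PySem.List.index? (v2 :: rest) mx with
        | none => rw [hidx2] at hidx; simp at hidx
        | some k => rw [hidx2] at hidx; simp at hidx; simp [hidx]
      have hub1 : v1 ≤ mx := hub v1 (by simp)
      have hub2 : v2 ≤ mx := hub v2 (by simp)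
      have hub' : ∀ y ∈ max v1 v2 :: (rest ++ [min v1 v2]), y ≤ mx := by
        intro y hy
        simp at hy
        rcases hy with hy | hy | hy
        · rcases max_choice v1 v2 with hc | hc <;> rw [hy, hc] <;> assumption
        · exact hub y (by simp [hy])
        · rcases min_choice v1 v2 with hc | hc <;> rw [hy, hc] <;> assumption
      have hidx' := pvIdx_step m v1 v2 rest mx hv1 hub1 hub2 htail
      match fuel, hfuel with
      | f + 1, hfuel =>
        have hremove : (if v1 > v2 then
              (match PySem.List.remove? (v1 :: v2 :: rest) v2 with
                | some r => r | none => v1 :: v2 :: rest) ++ [v2]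
            else
              (match PySem.List.remove? (v1 :: v2 :: rest) v1 with
                | some r => r | none => v1 :: v2 :: rest) ++ [v1])
            = max v1 v2 :: (rest ++ [min v1 v2]) := by
          by_cases hgt : v1 > v2
          · have hne : v1 ≠ v2 := by omega
            rw [if_pos hgt, PySem.List.remove?_cons_of_ne _ hne,
              PySem.List.remove?_cons_self]
            simp [max_eq_left (le_of_lt hgt), min_eq_right (le_of_lt hgt)]
          · have hle : v1 ≤ v2 := by omega
            rw [if_neg hgt, PySem.List.remove?_cons_self]
            simp [max_eq_right hle, min_eq_left hle]
        have hstep : pvLoopA (f + 1) mx (v1 :: v2 :: rest) dp c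
            = pvLoopA f mx (max v1 v2 :: (rest ++ [min v1 v2]))
                (dp.insert (c + 1) (v1, v2)) (c + 1) := by
          simp only [pvLoopA, PySem.List.pyGet?_zero_cons,
            pvGet_one]
          rw [if_neg hv1, hremove]
        rw [hstep, ih (max v1 v2 :: (rest ++ [min v1 v2])) mx
          (dp.insert (c + 1) (v1, v2)) (c + 1) f (by simp) hub' hidx' (by omega)]
        have hs : pvStab (v1 :: v2 :: rest) (m + 1)
            = pvStab (max v1 v2 :: (rest ++ [min v1 v2])) m := rfl
        have hp : pvPairs (v1 :: v2 :: rest) (m + 1)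
            = (v1, v2) :: pvPairs (max v1 v2 :: (rest ++ [min v1 v2])) m := rfl
        rw [hs, hp]
        have hc : c + ((m : Int) + 1) + 1 = c + 1 + (m : Int) + 1 := by ring
        simp [pvInsertSeq]
        push_cast
        ring

lemma pvInsertSeq_get? : ∀ (ps : List (Int × Int)) (dp : PySem.Dict Int (Int × Int)) (c x : Int),
    (pvInsertSeq dp c ps).get? x
      = if c < x ∧ x ≤ c + ps.length then ps[(x - c - 1).toNat]? else dp.get? x := by
  intro ps
  induction ps with
  | nil =>
    intro dp c x
    simp only [pvInsertSeq, List.length_nil, Nat.cast_zero, add_zero]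
    rw [if_neg (by omega)]
  | cons p ps ih =>
    intro dp c x
    simp only [pvInsertSeq, List.length_cons]
    rw [ih, PySem.Dict.get?_insert]
    by_cases hx : x = c + 1
    · subst hx
      rw [if_neg (by push_cast; omega), if_pos rfl, if_pos (by push_cast; omega)]
      norm_num
    · by_cases h3 : c + 1 < x ∧ x ≤ c + 1 + ps.length
      · rw [if_pos h3, if_pos (by push_cast at h3 ⊢; omega)]
        rw [show (x - c - 1).toNat = (x - (c + 1) - 1).toNat + 1 by omega,
          List.getElem?_cons_succ]
      · rw [if_neg h3, if_neg hx, if_neg (by push_cast at h3 ⊢; omega)]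

lemma pvInsertSeq_snoc : ∀ (ps : List (Int × Int)) (dp : PySem.Dict Int (Int × Int))
    (c : Int) (p : Int × Int),
    pvInsertSeq dp c (ps ++ [p]) = (pvInsertSeq dp c ps).insert (c + ps.length + 1) p := by
  intro ps
  induction ps with
  | nil => intro dp c p; simp [pvInsertSeq]
  | cons p' ps ih =>
    intro dp c p
    simp only [List.cons_append, pvInsertSeq]
    rw [ih]
    congr 1
    simp
    ring

lemma pvFoldB : ∀ (m : Nat) (v1 : Int) (t : List Int), m ≤ t.length →
    (PySem.List.pyRange 1 ((m : Int) + 1) 1).foldl (pvStepB (v1 :: t))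
        (PySem.Dict.empty, [], v1)
      = (pvInsertSeq PySem.Dict.empty 0 (pvPairs (v1 :: t) m),
         (pvPairs (v1 :: t) m).map (fun p => min p.1 p.2),
         pvPM v1 (t.take m)) := by
  intro m
  induction m with
  | zero =>
    intro v1 t _
    simp [show PySem.List.pyRange 1 (1 : Int) 1 = [] from rfl,
      pvPairs_zero, pvInsertSeq, pvPM]
  | succ m ih =>
    intro v1 t hm
    have hmt : m < t.length := by omega
    have hrange : PySem.List.pyRange 1 ((m : Int) + 1 + 1) 1
        = PySem.List.pyRange 1 ((m : Int) + 1) 1 ++ [(m : Int) + 1] :=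
      PySem.List.pyRange_one_succ_right (by omega)
    rw [show (((m + 1 : Nat) : Int) + 1) = ((m : Int) + 1 + 1) by push_cast; ring,
      hrange, List.foldl_append, ih v1 t (by omega)]
    simp only [List.foldl_cons, List.foldl_nil]
    have hget : PySem.List.pyGet? (v1 :: t) ((m : Int) + 1) = some t[m] := by
      rw [PySem.List.pyGet?_cons_succ, PySem.List.pyGet?_ofNat t m hmt]
    have hsnoc := pvPairs_snoc m v1 t hmt
    have hlen : (pvPairs (v1 :: t) m).length = m := pvPairs_length m (v1 :: t) (by simp; omega) (by simp; omega)
    have htd : t.getD m 0 = t[m] := by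
      rw [List.getD_eq_getElem?_getD, List.getElem?_eq_getElem hmt]; rfl
    simp only [pvStepB, hget, Option.getD_some]
    rw [hsnoc, pvInsertSeq_snoc, hlen, htd]
    refine congrArg₂ _ ?_ (congrArg₂ _ ?_ ?_)
    · norm_num
    · simp
    · rw [List.take_succ, List.getElem?_eq_getElem hmt]
      simp only [Option.toList_some]
      rw [pvPM, pvPM, List.foldl_append]
      simp only [List.foldl_cons, List.foldl_nil]
      by_cases hc : t[m] > (t.take m).foldl max v1
      · rw [if_pos hc]; omega
      · rw [if_neg hc]; omega

-- ===== VERDICT (by name: the statement is the Claim_ definition above) =====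
theorem find_elements_for_operations_spec : Claim_equal_find_elements_for_operations := by
  intro n q a queries _ hpre
  unfold Pre_find_elements_for_operations at hpre
  obtain ⟨hlen, -⟩ := hpre
  unfold Spec_find_elements_for_operations
  match a, hlen with
  | v1 :: t, hlen =>
    cases hmax : PySem.List.max? (v1 :: t) (fun y => y) with
    | none => exact absurd ((PySem.List.max?_eq_none_iff _ _).1 hmax) (by simp)
    | some mx =>
      have hmem : mx ∈ v1 :: t := PySem.List.max?_mem hmax
      have hsome : (PySem.List.index? (v1 :: t) mx).isSome :=
        (PySem.List.index?_isSome_iff _ _).2 hmem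
      cases hidx : PySem.List.index? (v1 :: t) mx with
      | none => rw [hidx] at hsome; simp at hsome
      | some m =>
        have hub : ∀ y ∈ v1 :: t, y ≤ mx := fun y hy => PySem.List.max?_isMax hmax y hy
        have hmlt : m < (v1 :: t).length := (PySem.List.getElem_of_index?_eq_some hidx).1
        have hloop := pvLoopA_spec m (v1 :: t) mx PySem.Dict.empty 0 (v1 :: t).length
          hlen hub hidx (by simp at hmlt ⊢; omega)
        have hstab := pvStab_eq m (v1 :: t) mx hlen hub hidx
        have hfold := pvFoldB m v1 t (by simp at hmlt; omega)
        have hpslen : (pvPairs (v1 :: t) m).length = m :=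
          pvPairs_length m (v1 :: t) hlen (by simp at hmlt ⊢; omega)
        simp only [find_elements_for_operations, find_elements_for_operations_alt, hmax, hidx,
          hloop, PySem.List.pyGet?_zero_cons, Option.getD_some, hfold, zero_add]
        rw [show ((m : Int) + 1) = ((m + 1 : Nat) : Int) by push_cast; ring,
          PySem.List.slice_from_natCast, ← hstab]
        apply PySem.List.foldl_congr_mem
        intro acc x hx
        have hget := pvInsertSeq_get? (pvPairs (v1 :: t) m) PySem.Dict.empty 0 x
        rw [hpslen] at hget
        by_cases hin : 1 ≤ x ∧ x ≤ (m : Int)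
        · have hcond : 0 < x ∧ x ≤ 0 + (m : Int) := by omega
          have hidxN : (x - 0 - 1).toNat < (pvPairs (v1 :: t) m).length := by
            rw [hpslen]; omega
          rw [hget, if_pos hcond, List.getElem?_eq_getElem hidxN]
          rw [if_pos hin]
          rfl
        · have hcond : ¬ (0 < x ∧ x ≤ 0 + (m : Int)) := by omega
          rw [hget, if_neg hcond, PySem.Dict.get?_empty, if_neg hin]
          rw [hstab]
          simp only [PySem.List.pyGet?_zero_cons]

@[simp] theorem find_elements_for_operations_raises : Claim_raises_find_elements_for_operations := by
  unfold Claim_raises_find_elements_for_operations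
  refine ⟨?_, by decide⟩
  intro n q a queries _ hr hp
  unfold Pre_find_elements_for_operations at hp
  unfold Raises_find_elements_for_operations at hr
  omega
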